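-- pv_equiv track=rewrite | github.com/RyeCat13/Lab-9 | Program 9 - Comp SCi Lab.py | reported_dict
-- ===== SOURCE A (Python) =====
-- def reported_dict(data):
--     dict_ex = {}
--     for sub in data[1:]:
--         temp = sub[1][0:2]
--         if temp in dict_ex:
--             dict_ex[temp]+=1
--         else:
--             dict_ex[temp]=1
--     return dict_ex
-- ===== SOURCE B (Python) =====
-- def reported_dict(data):
--     # Sort-based counting: materialize the 2-char prefixes, sort them, and count
--     # each run of equal keys with one linear scan; emit in first-occurrence order.
--     keys = [sub[1][0:2] for sub in data[1:]]
--     s = sorted(keys)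
--     counts = {}
--     i = 0
--     while i < len(s):
--         j = i
--         while j < len(s) and s[j] == s[i]:
--             j += 1
--         counts[s[i]] = j - i
--         i = j
--     # dict equality ignores order, but keep A's first-occurrence key order anyway
--     return {k: counts[k] for k in dict.fromkeys(keys)}
-- ===== Notes on version B (the rewrite author's own statement) =====
-- stated objective: alternative
-- what changed: B counts by sorting the materialized prefix list and run-length-scanning the sorted list (two-pointer runs) instead of A's hash-and-increment single pass, then emits the counts in first-occurrence key order.
import Mathlib
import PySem

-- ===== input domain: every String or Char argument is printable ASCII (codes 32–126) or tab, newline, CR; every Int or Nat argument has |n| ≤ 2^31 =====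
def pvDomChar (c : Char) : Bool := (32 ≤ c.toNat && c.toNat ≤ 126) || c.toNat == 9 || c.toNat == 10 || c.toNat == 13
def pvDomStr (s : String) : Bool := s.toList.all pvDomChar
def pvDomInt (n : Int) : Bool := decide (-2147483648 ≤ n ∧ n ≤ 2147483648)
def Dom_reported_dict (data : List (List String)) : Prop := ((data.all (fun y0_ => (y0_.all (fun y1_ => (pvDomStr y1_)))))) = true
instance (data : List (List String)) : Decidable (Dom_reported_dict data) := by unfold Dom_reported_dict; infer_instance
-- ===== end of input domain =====

-- B counts by sorting the prefix list and run-length-scanning the sorted runs,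
-- then emits the counts in first-occurrence key order (alternative algorithm).

-- ===== PORT A =====
def reported_dict (data : List (List String)) : List (String × Int) :=
  ((PySem.List.slice data (some 1) none).foldl
    (fun d sub =>
      let temp := PySem.Str.slice (PySem.List.pyGetD sub 1 "") (some 0) (some 2)
      if d.contains temp then d.insert temp (d.getD temp 0 + 1)
      else d.insert temp 1)
    PySem.Dict.empty).items

-- ===== PORT B =====
-- the while/while run-length scan of Source B: the inner 'while s[j] == s[i]' is the
-- takeWhile/dropWhile split of the current run, the outer loop is the recursion
def pvRunCounts : List String → PySem.Dict String Int → PySem.Dict String Int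
  | [], d => d
  | x :: t, d =>
      pvRunCounts (t.dropWhile (· == x)) (d.insert x (1 + (t.takeWhile (· == x)).length))
termination_by s _ => s.length
decreasing_by
  simpa using Nat.lt_succ_of_le (List.length_dropWhile_le _ _)

def reported_dict_alt (data : List (List String)) : List (String × Int) :=
  let keys := (PySem.List.slice data (some 1) none).map
    (fun sub => PySem.Str.slice (PySem.List.pyGetD sub 1 "") (some 0) (some 2))
  let counts := pvRunCounts (PySem.List.sorted keys (fun x => x) false) PySem.Dict.empty
  -- {k: counts[k] for k in dict.fromkeys(keys)}: the keys are distinct and in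
  -- first-occurrence order, so the dict's items list IS this map; counts[k] never
  -- raises since every k occurs in keys, so getD is exact here
  (PySem.List.dedup keys).map (fun k => (k, counts.getD k 0))

-- ===== PRECONDITION & SPEC =====
-- Pre_ excludes exactly the inputs where Python raises IndexError on sub[1]:
-- some row after the first has fewer than two entries.
def Pre_reported_dict (data : List (List String)) : Prop :=
  ∀ sub ∈ data.tail, 2 ≤ sub.length
instance (data : List (List String)) : Decidable (Pre_reported_dict data) := by
  unfold Pre_reported_dict; infer_instance

def pvWitness_reported_dict : List (List String) := [["header"], ["x", "abc"], ["y", "abd"]]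

def Spec_reported_dict (data : List (List String)) (out : List (String × Int)) : Prop := out = reported_dict_alt data
instance (data : List (List String)) (out : List (String × Int)) : Decidable (Spec_reported_dict data out) := by unfold Spec_reported_dict; infer_instance

-- ===== CLAIM (what is proved, stated in full; the proofs are below) =====
def Claim_equal_reported_dict : Prop := ∀ (data : List (List String)), Dom_reported_dict data → Pre_reported_dict data → Spec_reported_dict data (reported_dict data)

-- ===== LEMMAS AND PROOFS =====

-- A's branching step is exactly the unconditional counter step.
theorem reported_dict_step_eq (d : PySem.Dict String Int) (k : String) :
    (if d.contains k then d.insert k (d.getD k 0 + 1) else d.insert k 1)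
      = d.insert k (d.getD k 0 + 1) := by
  by_cases h : d.contains k = true
  · simp [h]
  · simp only [Bool.not_eq_true] at h
    simp [h, PySem.Dict.getD_of_not_contains d 0 h]

-- On a (≤)-sorted list, the run-length scan records each key's total count.
theorem pvRunCounts_getD : ∀ (s : List String) (d : PySem.Dict String Int),
    s.Pairwise (· ≤ ·) → ∀ (k : String),
      (pvRunCounts s d).getD k 0 = if k ∈ s then (s.count k : Int) else d.getD k 0 := by
  intro s d
  induction s, d using pvRunCounts.induct with
  | case1 d => simp [pvRunCounts]
  | case2 x t d ih =>
    intro hs k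
    have hsplit : t = t.takeWhile (· == x) ++ t.dropWhile (· == x) :=
      (List.takeWhile_append_dropWhile).symm
    have htw : ∀ y ∈ t.takeWhile (· == x), y = x := by
      intro y hy
      simpa using List.mem_takeWhile_imp hy
    -- every element of the dropped tail differs from x (sortedness)
    have hdw : ∀ y ∈ t.dropWhile (· == x), y ≠ x := by
      intro y hy
      rcases hd : t.dropWhile (· == x) with _ | ⟨z, r⟩
      · simp [hd] at hy
      · have hz : ¬ (z == x) = true := by
          have := List.head?_dropWhile_not (p := (· == x)) (l := t)
          simp [hd] at this; simpa using this
        have hzx : z ≠ x := by simpa using hz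
        have hxz : x ≤ z := by
          have hzt : z ∈ t := by
            rw [hsplit, hd]; exact List.mem_append_right _ (by simp)
          exact (List.pairwise_cons.1 hs).1 z hzt
        have hxlt : x < z := lt_of_le_of_ne hxz (Ne.symm hzx)
        rw [hd] at hy
        rcases List.mem_cons.1 hy with rfl | hyr
        · exact hzx
        · -- y comes after z in a sorted list: z ≤ y, so x < y
          have hzy : z ≤ y := by
            have hp : (t.dropWhile (· == x)).Pairwise (· ≤ ·) :=
              ((List.pairwise_cons.1 hs).2).sublist (List.dropWhile_sublist _)
            rw [hd] at hp
            exact (List.pairwise_cons.1 hp).1 y hyr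
          exact ne_of_gt (lt_of_lt_of_le hxlt hzy)
    have hrest : (t.dropWhile (· == x)).Pairwise (· ≤ ·) :=
      ((List.pairwise_cons.1 hs).2).sublist (List.dropWhile_sublist _)
    have hxnd : x ∉ t.dropWhile (· == x) := fun h => (hdw x h) rfl
    rw [pvRunCounts, ih hrest k]
    by_cases hk : k = x
    · subst hk
      have hcnt : (k :: t).count k = 1 + (t.takeWhile (· == k)).length := by
        have h0 : t.count k = (t.takeWhile (· == k) ++ t.dropWhile (· == k)).count k := by
          conv_lhs => rw [hsplit]
        have h1 : (t.takeWhile (· == k)).count k = (t.takeWhile (· == k)).length :=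
          List.count_eq_length.2 (fun y hy => by simp [htw y hy])
        have h2 : (t.dropWhile (· == k)).count k = 0 := List.count_eq_zero.2 hxnd
        rw [List.count_cons_self, h0, List.count_append]
        omega
      rw [if_neg hxnd, if_pos (List.mem_cons_self), PySem.Dict.getD_insert_self, hcnt]
      push_cast; ring
    · have h0 : t.count k = (t.takeWhile (· == x) ++ t.dropWhile (· == x)).count k := by
        conv_lhs => rw [hsplit]
      have htk : (t.takeWhile (· == x)).count k = 0 :=
        List.count_eq_zero.2 (fun h => hk (htw k h))
      have hxk : ¬ x = k := fun h => hk h.symm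
      have hcc : (x :: t).count k = (t.dropWhile (· == x)).count k := by
        rw [List.count_cons, h0, List.count_append, htk]
        simp [hxk]
      by_cases hm : k ∈ t.dropWhile (· == x)
      · have hmem : k ∈ x :: t := by
          apply List.mem_cons_of_mem
          rw [hsplit]
          exact List.mem_append_right _ hm
        rw [if_pos hm, if_pos hmem, hcc]
      · have hmem : k ∉ x :: t := by
          intro h
          rcases List.mem_cons.1 h with rfl | ht
          · exact hk rfl
          · rw [hsplit] at ht
            rcases List.mem_append.1 ht with h1 | h2
            · exact hk (htw k h1)
            · exact hm h2
        rw [if_neg hm, if_neg hmem]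
        simp [PySem.Dict.getD_insert, hk]

-- ===== VERDICT (by name: the statement is the Claim_ definition above) =====
theorem reported_dict_spec : Claim_equal_reported_dict := by
  intro data _ _
  unfold Spec_reported_dict reported_dict reported_dict_alt
  simp only [reported_dict_step_eq]
  rw [← List.foldl_map
       (f := fun sub => PySem.Str.slice (PySem.List.pyGetD sub 1 "") (some 0) (some 2))
       (g := fun (d : PySem.Dict String Int) k => d.insert k (d.getD k 0 + 1)),
     PySem.Dict.foldl_insert_getD_add_one_eq_counter, PySem.Dict.items_counter]
  set keys := (PySem.List.slice data (some 1) none).map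
    (fun sub => PySem.Str.slice (PySem.List.pyGetD sub 1 "") (some 0) (some 2)) with hkeys
  rw [← PySem.List.dedup_eq_ofList]
  apply List.map_congr_left
  intro k hk
  have hkmem : k ∈ keys := (PySem.List.mem_dedup keys k).1 hk
  have hks : k ∈ PySem.List.sorted keys (fun x => x) false :=
    (PySem.List.mem_sorted keys (fun x => x) false k).2 hkmem
  have hp : (PySem.List.sorted keys (fun x => x) false).Pairwise (· ≤ ·) := by
    simpa using PySem.List.sorted_pairwise keys (fun x => x)
  rw [pvRunCounts_getD (PySem.List.sorted keys (fun x => x) false) PySem.Dict.empty hp k,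
      if_pos hks, List.Perm.count_eq (PySem.List.sorted_perm keys (fun x => x) false)]
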